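-- pv_equiv track=rewrite | github.com/AI-6team/AI6_6team_Intermediate-Project | src/bidflow/db/database.py | _split_sql_script
-- ===== SOURCE A (Python) =====
-- def _split_sql_script(script: str) -> list[str]:
--     statements: list[str] = []
--     current: list[str] = []
--     in_single = False
--     in_double = False
--     i = 0
--
--     while i < len(script):
--         ch = script[i]
--         nxt = script[i + 1] if i + 1 < len(script) else ""
--
--         if ch == "'" and not in_double:
--             if in_single and nxt == "'":
--                 current.append(ch)
--                 current.append(nxt)
--                 i += 2
--                 continue
--             in_single = not in_single
--             current.append(ch)
--             i += 1
--             continue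
--
--         if ch == '"' and not in_single:
--             in_double = not in_double
--             current.append(ch)
--             i += 1
--             continue
--
--         if ch == ";" and not in_single and not in_double:
--             statement = "".join(current).strip()
--             if statement:
--                 statements.append(statement)
--             current = []
--             i += 1
--             continue
--
--         current.append(ch)
--         i += 1
--
--     tail = "".join(current).strip()
--     if tail:
--         statements.append(tail)
--     return statements
-- ===== SOURCE B (Python) =====
-- def _split_sql_script(script: str) -> list[str]:
--     n = len(script)
--     statements: list[str] = []
--     buf: list[str] = []
--     i = 0
--     while i < n:
--         ch = script[i]
--         if ch == "'":
--             # consume a whole single-quoted literal ('' is an escaped quote)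
--             j = i + 1
--             while j < n:
--                 if script[j] == "'":
--                     if j + 1 < n and script[j + 1] == "'":
--                         j += 2
--                     else:
--                         j += 1
--                         break
--                 else:
--                     j += 1
--             buf.append(script[i:j])
--             i = j
--         elif ch == '"':
--             # consume a whole double-quoted literal (no escapes)
--             j = i + 1
--             while j < n and script[j] != '"':
--                 j += 1
--             if j < n:
--                 j += 1
--             buf.append(script[i:j])
--             i = j
--         elif ch == ";":
--             stmt = "".join(buf).strip()
--             if stmt:
--                 statements.append(stmt)
--             buf = []
--             i += 1
--         else:
--             # consume a whole run of ordinary characters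
--             j = i + 1
--             while j < n and script[j] not in "'\";":
--                 j += 1
--             buf.append(script[i:j])
--             i = j
--     tail = "".join(buf).strip()
--     if tail:
--         statements.append(tail)
--     return statements
-- ===== Notes on version B (the rewrite author's own statement) =====
-- stated objective: faster
-- what changed: B consumes whole tokens (complete single-quoted literals with '' escapes, double-quoted literals, runs of plain characters) as slices instead of A's per-character loop with latched in_single/in_double boolean state.
import Mathlib
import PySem

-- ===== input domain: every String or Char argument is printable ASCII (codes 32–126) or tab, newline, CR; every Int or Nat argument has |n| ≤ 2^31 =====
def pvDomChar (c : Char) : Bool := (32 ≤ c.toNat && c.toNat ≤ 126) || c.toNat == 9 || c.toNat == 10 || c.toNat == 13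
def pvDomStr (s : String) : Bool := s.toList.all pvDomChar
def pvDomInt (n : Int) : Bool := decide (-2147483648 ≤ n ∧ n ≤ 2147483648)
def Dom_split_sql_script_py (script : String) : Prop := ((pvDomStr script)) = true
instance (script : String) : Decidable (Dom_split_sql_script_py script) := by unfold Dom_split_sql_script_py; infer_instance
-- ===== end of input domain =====

-- B replaces A's per-character scan with latched quote booleans by a token-level scan
-- (whole quoted literals / runs of plain chars consumed at once); same output (objective: alternative).

-- ===== PORT A =====
-- A's while-loop: index i becomes recursion on the remaining character list;
-- `nxt` is rest.head?, `i += 2` is recursion on rest.tail.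
def pvAloop : List Char → List Char → Bool → Bool → List String → List String
  | [], current, _, _, statements =>
      -- tail = "".join(current).strip(); if tail: statements.append(tail)
      let tail := PySem.Chars.strip current
      if tail ≠ [] then statements ++ [String.ofList tail] else statements
  | ch :: rest, current, in_single, in_double, statements =>
      if ch = '\'' ∧ in_double = false then
        if in_single = true ∧ rest.head? = some '\'' then
          pvAloop rest.tail (current ++ [ch, '\'']) in_single in_double statements
        else
          pvAloop rest (current ++ [ch]) (!in_single) in_double statements
      else if ch = '"' ∧ in_single = false then
        pvAloop rest (current ++ [ch]) in_single (!in_double) statements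
      else if ch = ';' ∧ in_single = false ∧ in_double = false then
        let statement := PySem.Chars.strip current
        pvAloop rest [] in_single in_double
          (if statement ≠ [] then statements ++ [String.ofList statement] else statements)
      else
        pvAloop rest (current ++ [ch]) in_single in_double statements
  termination_by l _ _ _ _ => l.length
  decreasing_by all_goals simp [List.length_tail]

def split_sql_script_py (script : String) : List String :=
  pvAloop script.toList [] false false []

-- ===== PORT B =====
-- B's inner while-loop consuming a single-quoted literal body after the opening quote:
-- returns (consumed characters incl. closing quote if any, remaining characters).
def pvSkipSingle : List Char → List Char × List Char
  | [] => ([], [])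
  | '\'' :: '\'' :: rest => let p := pvSkipSingle rest; ('\'' :: '\'' :: p.1, p.2)
  | '\'' :: rest => (['\''], rest)
  | c :: rest => let p := pvSkipSingle rest; (c :: p.1, p.2)

-- B's inner while-loop consuming a double-quoted literal body after the opening quote.
def pvSkipDouble : List Char → List Char × List Char
  | [] => ([], [])
  | '"' :: rest => (['"'], rest)
  | c :: rest => let p := pvSkipDouble rest; (c :: p.1, p.2)

-- `script[j] not in "'\";"` test of B's plain-run loop
def pvSpecial (c : Char) : Bool := c = '\'' || c = '"' || c = ';'

-- B's inner while-loop consuming the continuation of a run of ordinary characters.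
def pvTakeRun : List Char → List Char × List Char
  | [] => ([], [])
  | c :: rest => if pvSpecial c then ([], c :: rest)
                 else let p := pvTakeRun rest; (c :: p.1, p.2)

-- length facts needed for pvBloop's termination (cited by decreasing_by)
theorem pvSkipSingle_len : ∀ l : List Char, (pvSkipSingle l).2.length ≤ l.length := by
  intro l
  induction l using pvSkipSingle.induct <;> simp_all [pvSkipSingle] <;> omega

theorem pvSkipDouble_len : ∀ l : List Char, (pvSkipDouble l).2.length ≤ l.length := by
  intro l
  induction l using pvSkipDouble.induct <;> simp_all [pvSkipDouble] <;> omega -- third case needs the ≤ succ step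

theorem pvTakeRun_len : ∀ l : List Char, (pvTakeRun l).2.length ≤ l.length := by
  intro l
  induction l using pvTakeRun.induct <;> simp_all [pvTakeRun] <;> omega

-- B's outer while-loop: buf is the accumulated statement text, tokens are appended whole.
def pvBloop : List Char → List Char → List String → List String
  | [], buf, stmts =>
      let tail := PySem.Chars.strip buf
      if tail ≠ [] then stmts ++ [String.ofList tail] else stmts
  | ch :: rest, buf, stmts =>
      if ch = '\'' then
        let p := pvSkipSingle rest
        pvBloop p.2 (buf ++ ch :: p.1) stmts
      else if ch = '"' then
        let p := pvSkipDouble rest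
        pvBloop p.2 (buf ++ ch :: p.1) stmts
      else if ch = ';' then
        let s := PySem.Chars.strip buf
        pvBloop rest [] (if s ≠ [] then stmts ++ [String.ofList s] else stmts)
      else
        let p := pvTakeRun rest
        pvBloop p.2 (buf ++ ch :: p.1) stmts
  termination_by l _ _ => l.length
  decreasing_by
  · have := pvSkipSingle_len rest; simp; omega
  · have := pvSkipDouble_len rest; simp; omega
  · simp
  · have := pvTakeRun_len rest; simp; omega

def split_sql_script_py_alt (script : String) : List String :=
  pvBloop script.toList [] []

-- ===== PRECONDITION & SPEC =====
def Spec_split_sql_script_py (script : String) (out : List String) : Prop := out = split_sql_script_py_alt script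
instance (script : String) (out : List String) : Decidable (Spec_split_sql_script_py script out) := by unfold Spec_split_sql_script_py; infer_instance

-- ===== CLAIM (what is proved, stated in full; the proofs are below) =====
def Claim_equal_split_sql_script_py : Prop := ∀ (script : String), Dom_split_sql_script_py script → Spec_split_sql_script_py script (split_sql_script_py script)

-- ===== LEMMAS AND PROOFS =====

-- Inside a single-quoted literal, A's loop appends exactly what pvSkipSingle consumes.
theorem pvA_single (l : List Char) : ∀ cur stmts,
    pvAloop l cur true false stmts
      = pvAloop (pvSkipSingle l).2 (cur ++ (pvSkipSingle l).1) false false stmts := by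
  induction l using pvSkipSingle.induct with
  | case1 => intro cur stmts; simp [pvAloop, pvSkipSingle]
  | case2 rest ih =>
      intro cur stmts
      rw [pvAloop]
      simp only [pvSkipSingle]
      simp [ih (cur ++ ['\'', '\''])]
  | case3 rest h =>
      intro cur stmts
      rw [pvAloop]
      simp only [pvSkipSingle]
      have hh : ¬ rest.head? = some '\'' := by
        cases rest with
        | nil => simp
        | cons a t =>
            simp only [List.head?_cons, Option.some.injEq]
            intro ha; exact h t (by rw [ha])
      simp [hh]
  | case4 c rest h hne ih =>
      intro cur stmts
      rw [pvAloop]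
      simp only [pvSkipSingle]
      have hc : ¬ c = '\'' := hne
      simp [hc, ih]

-- Inside a double-quoted literal, A's loop appends exactly what pvSkipDouble consumes.
theorem pvA_double (l : List Char) : ∀ cur stmts,
    pvAloop l cur false true stmts
      = pvAloop (pvSkipDouble l).2 (cur ++ (pvSkipDouble l).1) false false stmts := by
  induction l using pvSkipDouble.induct with
  | case1 => intro cur stmts; simp [pvAloop, pvSkipDouble]
  | case2 rest =>
      intro cur stmts
      rw [pvAloop]
      simp [pvSkipDouble]
  | case3 c rest h ih =>
      intro cur stmts
      rw [pvAloop]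
      simp only [pvSkipDouble]
      have hc : ¬ c = '"' := h
      simp [hc, ih]

-- B's loop absorbs a plain run in one step.
theorem pvB_run : ∀ (l : List Char) buf stmts,
    pvBloop l buf stmts = pvBloop (pvTakeRun l).2 (buf ++ (pvTakeRun l).1) stmts := by
  intro l buf stmts
  match l with
  | [] => simp [pvTakeRun]
  | c :: rest =>
      by_cases h : pvSpecial c = true
      · simp [pvTakeRun, h]
      · have h' : (¬ c = '\'' ∧ ¬ c = '"') ∧ ¬ c = ';' := by
          simpa [pvSpecial] using h
        rw [pvBloop]
        simp [pvTakeRun, pvSpecial, h'.1.1, h'.1.2, h'.2]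

theorem pvMain : ∀ n (l : List Char), l.length ≤ n → ∀ cur stmts,
    pvAloop l cur false false stmts = pvBloop l cur stmts := by
  intro n
  induction n with
  | zero =>
      intro l hl cur stmts
      have : l = [] := List.eq_nil_of_length_eq_zero (Nat.le_zero.mp hl)
      subst this
      simp [pvAloop, pvBloop]
  | succ n ih =>
      intro l hl cur stmts
      match l with
      | [] => simp [pvAloop, pvBloop]
      | c :: rest =>
          have hrl : rest.length ≤ n := by simpa using hl
          by_cases h1 : c = '\''
          · subst h1
            have e1 : pvAloop ('\''::rest) cur false false stmts
                = pvAloop rest (cur ++ ['\'']) true false stmts := by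
              rw [pvAloop]; simp
            have e2 : pvBloop ('\''::rest) cur stmts
                = pvBloop (pvSkipSingle rest).2 (cur ++ '\'' :: (pvSkipSingle rest).1) stmts := by
              rw [pvBloop]; simp
            rw [e1, e2, pvA_single rest, ih _ (le_trans (pvSkipSingle_len rest) hrl)]
            simp
          · by_cases h2 : c = '"'
            · subst h2
              have e1 : pvAloop ('"'::rest) cur false false stmts
                  = pvAloop rest (cur ++ ['"']) false true stmts := by
                rw [pvAloop]; simp
              have e2 : pvBloop ('"'::rest) cur stmts
                  = pvBloop (pvSkipDouble rest).2 (cur ++ '"' :: (pvSkipDouble rest).1) stmts := by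
                rw [pvBloop]; simp
              rw [e1, e2, pvA_double rest, ih _ (le_trans (pvSkipDouble_len rest) hrl)]
              simp
            · by_cases h3 : c = ';'
              · subst h3
                rw [pvAloop, pvBloop]
                simp [h1, h2, ih rest hrl]
              · rw [pvAloop, pvBloop]
                simp only [h1, h2, h3, false_and, if_false]
                rw [ih rest hrl, pvB_run rest]
                simp

-- ===== VERDICT (by name: the statement is the Claim_ definition above) =====
theorem split_sql_script_py_spec : Claim_equal_split_sql_script_py := by
  intro script _
  unfold Spec_split_sql_script_py split_sql_script_py split_sql_script_py_alt
  exact pvMain script.toList.length script.toList le_rfl [] []
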